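-- pv_equiv track=rewrite | github.com/nissbar2/nlp-ex3 | main.py | gen_low_frequency_words
-- ===== SOURCE A (Python) =====
-- import operator
-- from collections import Counter, OrderedDict, defaultdict
-- from itertools import chain
--
-- def gen_low_frequency_words(train):
--     flat = list(chain.from_iterable(train))
--     train_words = Counter(map(operator.itemgetter(0), flat))
--     low_freq_words = set()
--     for word in train_words.keys():
--         if train_words[word] < 5:
--             low_freq_words.add(word)
--     return low_freq_words
-- ===== SOURCE B (Python) =====
-- from itertools import chain
--
-- def gen_low_frequency_words(train):
--     counts = {}
--     low = set()
--     for item in chain.from_iterable(train):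
--         word = item[0]
--         c = counts.get(word, 0) + 1
--         counts[word] = c
--         if c < 5:
--             low.add(word)
--         elif c == 5:
--             low.discard(word)
--     return low
-- ===== Notes on version B (the rewrite author's own statement) =====
-- stated objective: alternative
-- what changed: Replaces the Counter-then-filter two-phase approach with a single streaming pass that maintains the running count and the low-frequency set together, adding a word while its count is below 5 and discarding it the moment it reaches 5.
import Mathlib
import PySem

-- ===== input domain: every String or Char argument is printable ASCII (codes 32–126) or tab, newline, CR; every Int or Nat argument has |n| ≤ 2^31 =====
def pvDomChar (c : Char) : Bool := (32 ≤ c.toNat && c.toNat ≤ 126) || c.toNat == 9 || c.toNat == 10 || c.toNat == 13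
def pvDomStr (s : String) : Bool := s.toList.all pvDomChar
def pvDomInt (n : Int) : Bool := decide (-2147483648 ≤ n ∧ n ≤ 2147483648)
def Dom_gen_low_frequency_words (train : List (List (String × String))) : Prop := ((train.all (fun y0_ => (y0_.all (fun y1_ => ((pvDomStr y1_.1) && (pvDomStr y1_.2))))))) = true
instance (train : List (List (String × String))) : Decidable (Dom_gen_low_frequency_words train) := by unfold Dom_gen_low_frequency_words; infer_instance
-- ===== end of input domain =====

-- B replaces A's Counter-then-filter two-phase pass with a single streaming pass that maintains
-- the running counts and the low-frequency set together (alternative decomposition, same cost).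

-- ===== PORT A =====
def gen_low_frequency_words (train : List (List (String × String))) : List String :=
  let flat := train.flatMap id
  let train_words := PySem.Dict.counter (flat.map (fun p => p.1))
  let low_freq_words :=
    train_words.keys.foldl
      (fun s word => if train_words.getD word 0 < 5 then PySem.Set.add s word else s)
      PySem.Set.empty
  low_freq_words

-- ===== PORT B =====
def gen_low_frequency_words_alt (train : List (List (String × String))) : List String :=
  let res :=
    (train.flatMap id).foldl
      (fun (st : PySem.Dict String Int × PySem.Set String) item =>
        let word := item.1
        let c := st.1.getD word 0 + 1
        let counts := st.1.insert word c
        let low := if c < 5 then PySem.Set.add st.2 word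
                   else if c = 5 then PySem.Set.discard st.2 word
                   else st.2
        (counts, low))
      (PySem.Dict.empty, PySem.Set.empty)
  res.2

-- ===== PRECONDITION & SPEC =====
def Spec_gen_low_frequency_words (train : List (List (String × String))) (out : List String) : Prop := out = gen_low_frequency_words_alt train
instance (train : List (List (String × String))) (out : List String) : Decidable (Spec_gen_low_frequency_words train out) := by unfold Spec_gen_low_frequency_words; infer_instance

-- ===== CLAIM (what is proved, stated in full; the proofs are below) =====
def Claim_equal_gen_low_frequency_words : Prop := ∀ (train : List (List (String × String))), Dom_gen_low_frequency_words train → Spec_gen_low_frequency_words train (gen_low_frequency_words train)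

-- ===== LEMMAS AND PROOFS =====

-- A's loop over the (Nodup) keys list, adding fresh elements to the accumulator set, is a filter.
theorem foldl_add_if_filter {α : Type} [BEq α] [LawfulBEq α] (p : α → Bool) :
    ∀ (l : List α) (s : PySem.Set α), l.Nodup → (∀ x ∈ l, x ∉ s) →
      l.foldl (fun s w => if p w then PySem.Set.add s w else s) s = s ++ l.filter p := by
  intro l
  induction l with
  | nil => intro s _ _; simp
  | cons w t ih =>
    intro s hnd hfresh
    have hws : w ∉ s := hfresh w (by simp)
    have hnt : t.Nodup := (List.nodup_cons.mp hnd).2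
    have hwt : w ∉ t := (List.nodup_cons.mp hnd).1
    by_cases hp : p w
    · have hadd : PySem.Set.add s w = s ++ [w] := PySem.Set.add_of_not_mem hws
      simp only [List.foldl_cons, if_pos hp, hadd]
      rw [ih (s ++ [w]) hnt]
      · simp [hp]
      · intro x hx
        simp only [List.mem_append, List.mem_singleton]
        rintro (h | rfl)
        · exact hfresh x (by simp [hx]) h
        · exact hwt hx
    · simp only [List.foldl_cons, if_neg hp]
      rw [ih s hnt (fun x hx => hfresh x (by simp [hx]))]
      simp [hp]

-- Invariant of B's single pass: the first component is the running count dict, the second is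
-- the set of words of the processed prefix whose total-so-far count is below 5, in
-- first-occurrence order.
theorem stream_inv (xs : List (String × String)) :
    xs.foldl
      (fun (st : PySem.Dict String Int × PySem.Set String) item =>
        let word := item.1
        let c := st.1.getD word 0 + 1
        let counts := st.1.insert word c
        let low := if c < 5 then PySem.Set.add st.2 word
                   else if c = 5 then PySem.Set.discard st.2 word
                   else st.2
        (counts, low))
      (PySem.Dict.empty, PySem.Set.empty)
    = ((xs.map (fun p => p.1)).foldl (fun d x => d.insert x (d.getD x 0 + 1)) PySem.Dict.empty,
       (PySem.Set.ofList (xs.map (fun p => p.1))).filter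
         (fun w => decide ((((xs.map (fun p => p.1)).count w : Int)) < 5))) := by
  induction xs using List.reverseRecOn with
  | nil => rfl
  | append_singleton xs item ih =>
    rw [List.foldl_append, ih]
    simp only [List.foldl_cons, List.foldl_nil, List.map_append, List.map_cons, List.map_nil]
    rw [List.foldl_append]
    set ws := xs.map (fun p => p.1) with hws
    set w := item.1 with hw
    have hc : (ws.foldl (fun d x => d.insert x (d.getD x 0 + 1)) PySem.Dict.empty).getD w 0
        = (List.count w ws : Int) := by
      rw [PySem.Dict.getD_foldl_insert_add_one]
      simp [PySem.Dict.getD, PySem.Dict.empty, PySem.Dict.get?]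
    simp only [hc, List.foldl_cons, List.foldl_nil, Prod.mk.injEq]
    refine ⟨trivial, ?_⟩
    rw [PySem.Set.ofList_append_singleton]
    by_cases h5 : (List.count w ws : Int) + 1 < 5
    · rw [if_pos h5]
      by_cases hmem : w ∈ ws
      · rw [PySem.Set.add_of_mem ((PySem.Set.mem_ofList ws w).mpr hmem),
            PySem.Set.add_of_mem (s := List.filter _ (PySem.Set.ofList ws))
              (List.mem_filter.mpr ⟨(PySem.Set.mem_ofList ws w).mpr hmem, by simp; omega⟩)]
        refine (List.filter_congr ?_).symm
        intro x hx
        by_cases hxw : x = w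
        · subst hxw; simp [List.count_append]; omega
        · simp [List.count_append, Ne.symm hxw]
      · have hn0 : List.count w ws = 0 := List.count_eq_zero.mpr hmem
        have hwnotS : w ∉ List.filter (fun w => decide ((List.count w ws : Int) < 5)) (PySem.Set.ofList ws) := by
          intro h
          exact hmem ((PySem.Set.mem_ofList ws w).mp (List.mem_filter.mp h).1)
        rw [PySem.Set.add_of_not_mem hwnotS,
            PySem.Set.add_of_not_mem (fun h => hmem ((PySem.Set.mem_ofList ws w).mp h)),
            List.filter_append]
        congr 1
        · refine (List.filter_congr ?_).symm
          intro x hx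
          have hxw : ¬ w = x := fun h => hmem (h ▸ (PySem.Set.mem_ofList ws x).mp hx)
          simp [List.count_append, hxw]
        · simp [List.count_append, hn0]
    · rw [if_neg h5]
      by_cases h5' : (List.count w ws : Int) + 1 = 5
      · rw [if_pos h5']
        have hmem : w ∈ ws := List.count_pos_iff.mp (by omega)
        rw [PySem.Set.add_of_mem ((PySem.Set.mem_ofList ws w).mpr hmem)]
        show List.filter _ _ = _
        rw [List.filter_filter]
        refine (List.filter_congr ?_).symm
        intro x hx
        by_cases hxw : x = w
        · subst hxw; simp [List.count_append]; omega
        · simp [List.count_append, Ne.symm hxw, hxw]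
      · rw [if_neg h5']
        have hmem : w ∈ ws := List.count_pos_iff.mp (by omega)
        rw [PySem.Set.add_of_mem ((PySem.Set.mem_ofList ws w).mpr hmem)]
        refine (List.filter_congr ?_).symm
        intro x hx
        by_cases hxw : x = w
        · subst hxw; simp [List.count_append]; omega
        · simp [List.count_append, Ne.symm hxw]

-- The two ports agree: A's keys-of-Counter filter equals B's streamed set.
theorem ports_agree (train : List (List (String × String))) :
    gen_low_frequency_words train = gen_low_frequency_words_alt train := by
  simp only [gen_low_frequency_words, gen_low_frequency_words_alt]
  rw [stream_inv, PySem.Dict.keys_counter]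
  have hfun : (fun (s : PySem.Set String) word =>
      if (PySem.Dict.counter ((train.flatMap id).map (fun p => p.1))).getD word 0 < 5
      then PySem.Set.add s word else s)
    = (fun (s : PySem.Set String) word =>
      if (fun w => decide ((List.count w ((train.flatMap id).map (fun p => p.1)) : Int) < 5)) word
      then PySem.Set.add s word else s) := by
    funext s word
    rw [PySem.Dict.getD_counter]
    simp
  rw [hfun, foldl_add_if_filter _ _ _ (PySem.Set.nodup_ofList _)
        (by intro x hx h; exact (List.not_mem_nil).elim h)]
  simp

-- ===== VERDICT (by name: the statement is the Claim_ definition above) =====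
theorem gen_low_frequency_words_spec : Claim_equal_gen_low_frequency_words := by
  intro train _
  unfold Spec_gen_low_frequency_words
  exact ports_agree train
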